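-- pv_equiv track=rewrite | github.com/Kartikdamdhar10/developer | lambdafirst.py | sortByPattern
-- ===== SOURCE A (Python) =====
-- def sortByPattern(pat, str):
--     priority = list(pat)
--
--     myDict = {priority[i] : i for i in range(len(priority))}
--
--     str = list(str)
--
--     str.sort(key=lambda ele : myDict[ele])
--
--     str.reverse()
--
--     new_str = ''.join(str)
--     return new_str
-- ===== SOURCE B (Python) =====
-- def sortByPattern(pat, str):
--     counts = {}
--     for ch in str:
--         counts[ch] = counts.get(ch, 0) + 1
--     pieces = []
--     seen = set()
--     for ch in reversed(pat):
--         if ch not in seen: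
--             seen.add(ch)
--             pieces.append(ch * counts.get(ch, 0))
--     return ''.join(pieces)
-- ===== Notes on version B (the rewrite author's own statement) =====
-- stated objective: faster
-- what changed: Replaces the comparison sort (sort by last-index-in-pattern key, then reverse) with a counting sort: one pass tallies character counts, then one pass over the reversed pattern emits each distinct character's run, removing the O(n log n) sort.
import Mathlib
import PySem

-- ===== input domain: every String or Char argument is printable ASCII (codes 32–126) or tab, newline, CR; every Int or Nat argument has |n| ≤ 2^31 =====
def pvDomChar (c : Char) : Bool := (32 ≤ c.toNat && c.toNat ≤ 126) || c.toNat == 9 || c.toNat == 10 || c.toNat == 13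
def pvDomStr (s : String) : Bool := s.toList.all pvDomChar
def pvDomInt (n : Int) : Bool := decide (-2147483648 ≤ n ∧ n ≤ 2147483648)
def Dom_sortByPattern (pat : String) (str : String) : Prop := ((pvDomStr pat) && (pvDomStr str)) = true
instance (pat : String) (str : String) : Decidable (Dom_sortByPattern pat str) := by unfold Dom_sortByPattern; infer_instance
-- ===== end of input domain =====

-- B replaces A's comparison sort (sort by last-pattern-index key, then reverse) with a counting
-- sort: tally character counts, then emit each distinct character's run scanning the pattern in
-- reverse (objective: faster, the sort disappears).

-- ===== PORT A =====
-- myDict[ele] raises KeyError when ele is not a pattern character; ported as getD with default 0,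
-- exact under Pre_sortByPattern (every character of str occurs in pat).
def sortByPattern (pat : String) (str : String) : String :=
  let priority : List Char := pat.toList
  let myDict : PySem.Dict Char Int :=
    (PySem.List.pyRange 0 priority.length 1).foldl
      (fun d i => d.insert (PySem.List.pyGetD priority i ' ') i) PySem.Dict.empty
  let s : List Char := str.toList
  let s := PySem.List.sorted s (fun ele => myDict.getD ele 0) false
  let s := s.reverse
  String.ofList s   -- ''.join of a list of characters

-- ===== PORT B =====
def sortByPattern_alt (pat : String) (str : String) : String :=
  let counts : PySem.Dict Char Int :=
    str.toList.foldl (fun d ch => d.insert ch (d.getD ch 0 + 1)) PySem.Dict.empty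
  let res :=
    pat.toList.reverse.foldl
      (fun (acc : List (List Char) × PySem.Set Char) ch =>
        if PySem.Set.contains acc.2 ch then acc
        else (acc.1 ++ [List.replicate (counts.getD ch 0).toNat ch], PySem.Set.add acc.2 ch))
      ([], PySem.Set.empty)
  String.ofList res.1.flatten   -- ''.join of the collected pieces

-- ===== PRECONDITION & SPEC =====
-- Pre_ excludes exactly the inputs where A raises KeyError: some character of str missing from pat.
def Pre_sortByPattern (pat : String) (str : String) : Prop :=
  str.toList.all (fun c => pat.toList.contains c) = true

instance (pat : String) (str : String) : Decidable (Pre_sortByPattern pat str) := by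
  unfold Pre_sortByPattern; infer_instance

def pvWitness_sortByPattern : String × String := ("bca", "abcabc")

def Spec_sortByPattern (pat : String) (str : String) (out : String) : Prop := out = sortByPattern_alt pat str
instance (pat : String) (str : String) (out : String) : Decidable (Spec_sortByPattern pat str out) := by unfold Spec_sortByPattern; infer_instance

-- ===== CLAIM (what is proved, stated in full; the proofs are below) =====
def Claim_equal_sortByPattern : Prop := ∀ (pat : String) (str : String), Dom_sortByPattern pat str → Pre_sortByPattern pat str → Spec_sortByPattern pat str (sortByPattern pat str)

-- ===== LEMMAS AND PROOFS =====

def pvDD (S : PySem.Set Char) : List Char → List Char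
  | [] => []
  | c :: l => if PySem.Set.contains S c then pvDD S l else c :: pvDD (PySem.Set.add S c) l

lemma pv_contains_iff (S : PySem.Set Char) (c : Char) :
    PySem.Set.contains S c = true ↔ c ∈ S := by
  simp [PySem.Set.contains]

lemma pvDD_cons (S : PySem.Set Char) (c : Char) (l : List Char) :
    pvDD S (c :: l) = if c ∈ S then pvDD S l else c :: pvDD (PySem.Set.add S c) l := by
  by_cases hm : c ∈ S
  · simp only [pvDD]
    rw [if_pos ((pv_contains_iff S c).2 hm), if_pos hm]
  · simp only [pvDD]
    rw [if_neg (fun h => hm ((pv_contains_iff S c).1 h)), if_neg hm]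

lemma pv_mem_dd (l : List Char) (S : PySem.Set Char) (a : Char) :
    a ∈ pvDD S l ↔ a ∈ l ∧ a ∉ S := by
  induction l generalizing S with
  | nil => simp [pvDD]
  | cons c l ih =>
    by_cases hm : c ∈ S
    · simp only [pvDD_cons, hm, if_true, ih, List.mem_cons]
      constructor
      · rintro ⟨h1, h2⟩; exact ⟨Or.inr h1, h2⟩
      · rintro ⟨h1 | h1, h2⟩
        · exact absurd (h1 ▸ hm) h2
        · exact ⟨h1, h2⟩
    · simp only [pvDD_cons, hm, if_false, List.mem_cons, ih, PySem.Set.mem_add]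
      constructor
      · rintro (rfl | ⟨h1, h2⟩)
        · exact ⟨Or.inl rfl, hm⟩
        · exact ⟨Or.inr h1, fun hS => h2 (Or.inl hS)⟩
      · rintro ⟨rfl | h1, h2⟩
        · exact Or.inl rfl
        · by_cases hac : a = c
          · exact Or.inl hac
          · refine Or.inr ⟨h1, fun h => ?_⟩
            rcases h with h | h
            · exact h2 h
            · exact hac h

lemma pv_nodup_dd (l : List Char) (S : PySem.Set Char) : (pvDD S l).Nodup := by
  induction l generalizing S with
  | nil => simp [pvDD]
  | cons c l ih =>
    by_cases hm : c ∈ S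
    · simpa [pvDD_cons, hm] using ih S
    · simp only [pvDD_cons, hm, if_false, List.nodup_cons]
      refine ⟨fun h => ?_, ih _⟩
      have := (pv_mem_dd _ _ _).1 h
      exact this.2 ((PySem.Set.mem_add S c c).2 (Or.inr rfl))

lemma pv_dd_pairwise (l : List Char) (S : PySem.Set Char) :
    (pvDD S l).Pairwise (fun a b => List.idxOf a l < List.idxOf b l) := by
  induction l generalizing S with
  | nil => simp [pvDD]
  | cons c l ih =>
    have lift : ∀ (S' : PySem.Set Char), c ∈ S' →
        (pvDD S' l).Pairwise (fun a b => List.idxOf a (c :: l) < List.idxOf b (c :: l)) := by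
      intro S' hcS'
      refine (ih S').imp_of_mem ?_
      intro a b ha hb hab
      have hane : a ≠ c := fun h => ((pv_mem_dd _ _ _).1 ha).2 (h ▸ hcS')
      have hbne : b ≠ c := fun h => ((pv_mem_dd _ _ _).1 hb).2 (h ▸ hcS')
      rw [List.idxOf_cons_ne _ (Ne.symm hane), List.idxOf_cons_ne _ (Ne.symm hbne)]
      omega
    by_cases hm : c ∈ S
    · simpa [pvDD_cons, hm] using lift S hm
    · simp only [pvDD_cons, hm, if_false, List.pairwise_cons]
      constructor
      · intro b hb
        have hbne : b ≠ c := fun h =>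
          ((pv_mem_dd _ _ _).1 hb).2 ((PySem.Set.mem_add S c b).2 (Or.inr h))
        rw [List.idxOf_cons_self, List.idxOf_cons_ne _ (Ne.symm hbne)]
        omega
      · exact lift _ ((PySem.Set.mem_add S c c).2 (Or.inr rfl))

lemma pv_foldB (f : Char → List Char) (l : List Char) (P : List (List Char)) (S : PySem.Set Char) :
    (l.foldl (fun (acc : List (List Char) × PySem.Set Char) ch =>
        if PySem.Set.contains acc.2 ch then acc
        else (acc.1 ++ [f ch], PySem.Set.add acc.2 ch)) (P, S)).1
      = P ++ (pvDD S l).map f := by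
  induction l generalizing P S with
  | nil => simp [pvDD]
  | cons c l ih =>
    by_cases hm : c ∈ S
    · have hc : PySem.Set.contains S c = true := (pv_contains_iff S c).2 hm
      simp only [List.foldl_cons, hc, if_true, pvDD_cons, hm, ih]
    · have hc : PySem.Set.contains S c = false := by
        by_contra h
        exact hm ((pv_contains_iff S c).1 (by revert h; cases PySem.Set.contains S c <;> simp))
      simp only [List.foldl_cons, hc, Bool.false_eq_true, if_false, pvDD_cons, hm, ih,
        List.map_cons]
      simp

lemma pv_char_lt (c : Char) : (c.toNat : Int) < 2097152 := by
  have h := c.valid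
  rcases h with h | ⟨h1, h2⟩ <;>
    · simp only [Char.toNat] at *
      omega

lemma pv_key'_inj (K : Char → Int) :
    Function.Injective (fun c => K c * 2097152 + (c.toNat : Int)) := by
  intro a b h
  simp only at h
  have ha := pv_char_lt a
  have hb := pv_char_lt b
  have ha0 : (0:Int) ≤ a.toNat := by positivity
  have hb0 : (0:Int) ≤ b.toNat := by positivity
  have htn : (a.toNat : Int) = b.toNat := by
    by_cases hK : K a = K b
    · rw [hK] at h; omega
    · exfalso; rcases lt_or_gt_of_ne hK with hlt | hlt <;> nlinarith
  have h2 : a.toNat = b.toNat := by exact_mod_cast htn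
  exact Char.ext (UInt32.toNat_inj.mp h2)

lemma pv_perm_flat (E : List Char) (s : List Char) (hnd : E.Nodup)
    (hmem : ∀ c ∈ s, c ∈ E) :
    (E.flatMap fun c => List.replicate (s.count c) c).Perm s := by
  induction E generalizing s with
  | nil =>
    have : s = [] := List.eq_nil_iff_forall_not_mem.2 (fun a ha => by simpa using hmem a ha)
    simp [this]
  | cons e E ih =>
    rw [List.flatMap_cons]
    have hcongr : (E.flatMap fun c => List.replicate (s.count c) c)
        = E.flatMap fun c => List.replicate ((s.filter (fun x => x != e)).count c) c := by
      rw [List.flatMap_def, List.flatMap_def]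
      congr 1
      refine List.map_congr_left ?_
      intro c hc
      have hne : c ≠ e := fun h => (List.nodup_cons.1 hnd).1 (h ▸ hc)
      rw [List.count_filter (by simp [hne])]
    rw [hcongr]
    have hsub : ∀ c ∈ s.filter (fun x => x != e), c ∈ E := by
      intro c hc
      have h1 := List.of_mem_filter hc
      have h2 := List.mem_of_mem_filter hc
      rcases List.mem_cons.1 (hmem c h2) with h | h
      · subst h; simp at h1
      · exact h
    have hperm := ih (s.filter (fun x => x != e)) (List.nodup_cons.1 hnd).2 hsub
    have hfb : List.replicate (s.count e) e = s.filter (fun x => x == e) := (List.filter_beq e).symm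
    refine (hperm.append_left _).trans ?_
    rw [hfb]
    have hp := List.filter_append_perm (fun x => x == e) s
    simpa [bne] using hp

lemma pv_pairwise_flat (K : Char → Int) (n : Char → Nat) (E : List Char)
    (h : E.Pairwise (fun a b => K a < K b)) :
    (E.flatMap fun c => List.replicate (n c) c).Pairwise
      (fun a b => K a * 2097152 + (a.toNat : Int) ≤ K b * 2097152 + (b.toNat : Int)) := by
  induction E with
  | nil => simp
  | cons e E ih =>
    rw [List.flatMap_cons, List.pairwise_append]
    rcases List.pairwise_cons.1 h with ⟨hhead, htail⟩
    refine ⟨List.pairwise_replicate.2 (Or.inr le_rfl), ih htail, ?_⟩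
    intro a ha b hb
    have hae : a = e := List.eq_of_mem_replicate ha
    rcases List.mem_flatMap.1 hb with ⟨c, hcE, hbc⟩
    have hbc' : b = c := List.eq_of_mem_replicate hbc
    have hlt : K a < K b := by rw [hae, hbc']; exact hhead c hcE
    have h1 := pv_char_lt a
    have h2 := pv_char_lt b
    have h10 : (0:Int) ≤ a.toNat := by positivity
    have h20 : (0:Int) ≤ b.toNat := by positivity
    nlinarith

def pvBuildD (cs : List Char) : PySem.Dict Char Int :=
  (PySem.List.pyRange 0 cs.length 1).foldl
    (fun d i => d.insert (PySem.List.pyGetD cs i ' ') i) PySem.Dict.empty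

lemma pv_build_step (ds : List Char) (x : Char) :
    pvBuildD (ds ++ [x]) = (pvBuildD ds).insert x (ds.length : Int) := by
  unfold pvBuildD
  have hlen : ((ds ++ [x]).length : Int) = (ds.length : Int) + 1 := by
    simp
  rw [hlen, PySem.List.pyRange_one_succ_right (by positivity), List.foldl_append]
  simp only [List.foldl_cons, List.foldl_nil]
  have hgetlast : PySem.List.pyGetD (ds ++ [x]) (ds.length : Int) ' ' = x := by
    rw [PySem.List.pyGetD_eq_getElem _ _ (by positivity) (by simp)]
    simp
  rw [hgetlast]
  congr 1
  refine PySem.List.foldl_congr_mem _ _ _ _ ?_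
  intro d i hi
  have hi' := (PySem.List.mem_pyRange_one).1 hi
  have hget : PySem.List.pyGetD (ds ++ [x]) i ' ' = PySem.List.pyGetD ds i ' ' := by
    rw [PySem.List.pyGetD_eq_getElem _ _ hi'.1 (by simp; omega),
        PySem.List.pyGetD_eq_getElem _ _ hi'.1 (by exact_mod_cast hi'.2)]
    rw [List.getElem_append_left]
  rw [hget]

lemma pv_build_getD (cs : List Char) (c : Char) :
    (pvBuildD cs).getD c 0 =
      if c ∈ cs then (cs.length : Int) - 1 - (List.idxOf c cs.reverse : Int) else 0 := by
  induction cs using List.reverseRecOn with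
  | nil => simp [pvBuildD, PySem.List.pyRange]
  | append_singleton ds x ih =>
    rw [pv_build_step, PySem.Dict.getD_insert]
    by_cases hcx : c = x
    · subst hcx
      simp [List.reverse_append, List.idxOf_cons_self]
    · rw [if_neg hcx, ih]
      have hrev : (ds ++ [x]).reverse = x :: ds.reverse := by simp
      by_cases hmem : c ∈ ds
      · rw [if_pos hmem, if_pos (by simp [hmem]), hrev,
          List.idxOf_cons_ne _ (fun h => hcx h.symm)]
        have hlt : List.idxOf c ds.reverse < ds.reverse.length :=
          List.idxOf_lt_length_of_mem (List.mem_reverse.2 hmem)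
        simp at hlt ⊢
        omega
      · rw [if_neg hmem, if_neg (by simp [hmem, hcx])]

lemma pv_K_injOn (cs : List Char) (a b : Char) (ha : a ∈ cs) (hb : b ∈ cs)
    (h : (pvBuildD cs).getD a 0 = (pvBuildD cs).getD b 0) : a = b := by
  rw [pv_build_getD, pv_build_getD, if_pos ha, if_pos hb] at h
  have hla : List.idxOf a cs.reverse < cs.reverse.length :=
    List.idxOf_lt_length_of_mem (List.mem_reverse.2 ha)
  have hlb : List.idxOf b cs.reverse < cs.reverse.length :=
    List.idxOf_lt_length_of_mem (List.mem_reverse.2 hb)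
  have hR : List.idxOf a cs.reverse = List.idxOf b cs.reverse := by omega
  have hva := List.getElem_idxOf hla
  have hvb := List.getElem_idxOf hlb
  rw [← hva, ← hvb]
  congr 1

-- sorted-by-last-index equals the reverse-order run concatenation
lemma pv_core (cs s : List Char) (hpre : ∀ c ∈ s, c ∈ cs) :
    PySem.List.sorted s (fun c => (pvBuildD cs).getD c 0) false
      = ((pvDD PySem.Set.empty cs.reverse).reverse.flatMap
          fun c => List.replicate (s.count c) c) := by
  have hndE : (pvDD PySem.Set.empty cs.reverse).reverse.Nodup :=
    List.nodup_reverse.2 (pv_nodup_dd _ _)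
  have hmemE : ∀ c ∈ s, c ∈ (pvDD PySem.Set.empty cs.reverse).reverse := by
    intro c hc
    rw [List.mem_reverse, pv_mem_dd]
    exact ⟨List.mem_reverse.2 (hpre c hc), by simp [PySem.Set.empty]⟩
  apply PySem.List.eq_of_perm_of_pairwise_le_of_injective
      (fun c => (pvBuildD cs).getD c 0 * 2097152 + (c.toNat : Int))
      (pv_key'_inj (fun c => (pvBuildD cs).getD c 0))
  · exact (PySem.List.sorted_perm s _ false).trans (pv_perm_flat _ s hndE hmemE).symm
  · refine (PySem.List.sorted_pairwise s _).imp_of_mem ?_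
    intro a b ha hb hab
    have ha' : a ∈ cs := hpre a ((PySem.List.mem_sorted _ _ _ _).1 ha)
    have hb' : b ∈ cs := hpre b ((PySem.List.mem_sorted _ _ _ _).1 hb)
    by_cases heq : a = b
    · subst heq; omega
    · have hne : (pvBuildD cs).getD a 0 ≠ (pvBuildD cs).getD b 0 :=
        fun h => heq (pv_K_injOn cs a b ha' hb' h)
      have hlt := lt_of_le_of_ne hab hne
      have h1 := pv_char_lt a
      have h2 := pv_char_lt b
      have h10 : (0:Int) ≤ a.toNat := by positivity
      have h20 : (0:Int) ≤ b.toNat := by positivity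
      nlinarith
  · refine pv_pairwise_flat _ (fun c => s.count c) _ ?_
    have h1 : (pvDD PySem.Set.empty cs.reverse).reverse.Pairwise
        (fun a b => List.idxOf a cs.reverse > List.idxOf b cs.reverse) :=
      List.pairwise_reverse.2 (pv_dd_pairwise cs.reverse PySem.Set.empty)
    refine h1.imp_of_mem ?_
    intro a b ha hb hab
    have ha' : a ∈ cs.reverse := ((pv_mem_dd _ _ _).1 (List.mem_reverse.1 ha)).1
    have hb' : b ∈ cs.reverse := ((pv_mem_dd _ _ _).1 (List.mem_reverse.1 hb)).1
    have hla := List.idxOf_lt_length_of_mem ha'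
    have hlb := List.idxOf_lt_length_of_mem hb'
    rw [pv_build_getD, pv_build_getD, if_pos (List.mem_reverse.1 ha'),
        if_pos (List.mem_reverse.1 hb')]
    simp only [List.length_reverse] at hla hlb
    omega

-- ===== VERDICT (by name: the statement is the Claim_ definition above) =====
theorem sortByPattern_spec : Claim_equal_sortByPattern := by
  intro pat str _ hpre0
  have hpre : ∀ c ∈ str.toList, c ∈ pat.toList := by
    intro c hc
    have := List.all_eq_true.1 hpre0 c hc
    simpa using this
  unfold Spec_sortByPattern
  have hA : sortByPattern pat str
      = String.ofList ((PySem.List.sorted str.toList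
          (fun c => (pvBuildD pat.toList).getD c 0) false).reverse) := rfl
  have hB : sortByPattern_alt pat str
      = String.ofList (((pvDD PySem.Set.empty pat.toList.reverse).map
          (fun c => List.replicate
            (((str.toList.foldl (fun (d : PySem.Dict Char Int) ch => d.insert ch (d.getD ch 0 + 1))
              PySem.Dict.empty).getD c 0)).toNat c)).flatten) := by
    show String.ofList ((pat.toList.reverse.foldl _ ([], PySem.Set.empty)).1.flatten) = _
    rw [pv_foldB]
    simp
  rw [hA, hB]
  have hcnt : ∀ c : Char,
      (((str.toList.foldl (fun (d : PySem.Dict Char Int) ch => d.insert ch (d.getD ch 0 + 1))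
        PySem.Dict.empty).getD c 0)).toNat = str.toList.count c := by
    intro c
    rw [PySem.Dict.getD_foldl_insert_add_one]
    simp
  have hmap : ((pvDD PySem.Set.empty pat.toList.reverse).map
      (fun c => List.replicate
        (((str.toList.foldl (fun (d : PySem.Dict Char Int) ch => d.insert ch (d.getD ch 0 + 1))
          PySem.Dict.empty).getD c 0)).toNat c)).flatten
      = (pvDD PySem.Set.empty pat.toList.reverse).flatMap
          (fun c => List.replicate (str.toList.count c) c) := by
    rw [List.flatMap_def]
    congr 1
    exact List.map_congr_left (fun c _ => by rw [hcnt c])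
  rw [hmap]
  congr 1
  rw [pv_core pat.toList str.toList hpre, List.reverse_flatMap]
  simp only [List.reverse_reverse]
  rw [List.flatMap_def, List.flatMap_def]
  congr 1
  exact List.map_congr_left (fun c _ => by simp [List.reverse_replicate])
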